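-- pv_equiv track=rewrite | github.com/Aaslknc/PYTHON | unidade3/t1questao1.py | calcular_resultado
-- ===== SOURCE A (Python) =====
-- def calcular_resultado(participantes, numeros):
--     acertos = []
--
--     for participante in participantes.keys():
--         acertou = 0
--         for numero in numeros:
--             if numero in participantes[participante]:
--                 acertou += 1
--
--         acertos.append(acertou)
--
--     return acertos
-- ===== SOURCE B (Python) =====
-- def calcular_resultado(participantes, numeros):
--     freq = {}
--     for n in numeros:
--         freq[n] = freq.get(n, 0) + 1
--     return [sum(freq.get(v, 0) for v in set(vals)) for vals in participantes.values()]
-- ===== Notes on version B (the rewrite author's own statement) =====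
-- stated objective: faster
-- what changed: B builds a frequency dict of numeros once and, per participant, sums the frequencies of the distinct values in their collection, replacing A's full rescan of numeros for every participant.
import Mathlib
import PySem

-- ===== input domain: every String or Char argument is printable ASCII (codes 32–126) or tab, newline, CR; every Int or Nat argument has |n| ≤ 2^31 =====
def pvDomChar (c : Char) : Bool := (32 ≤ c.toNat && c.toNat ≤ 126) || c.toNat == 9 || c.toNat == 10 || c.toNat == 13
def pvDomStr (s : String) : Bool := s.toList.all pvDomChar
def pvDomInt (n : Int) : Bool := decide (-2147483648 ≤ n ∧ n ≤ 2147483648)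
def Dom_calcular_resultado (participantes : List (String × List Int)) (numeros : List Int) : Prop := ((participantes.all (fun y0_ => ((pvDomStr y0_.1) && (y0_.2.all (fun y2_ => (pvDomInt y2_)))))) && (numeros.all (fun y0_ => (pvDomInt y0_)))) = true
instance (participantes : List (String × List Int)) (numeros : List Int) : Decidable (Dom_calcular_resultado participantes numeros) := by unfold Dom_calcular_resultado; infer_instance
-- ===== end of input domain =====

-- ===== PORT A =====
-- B changes the decomposition: a frequency dict over `numeros` built once replaces A's inner scan of `numeros` per participant (objective: faster).
-- A: for each participant key, scan all of numeros, testing membership in that participant's list.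
def calcular_resultado (participantes : List (String × List Int)) (numeros : List Int) : List Int :=
  (PySem.Dict.mk participantes).keys.foldl
    (fun acertos participante =>
      acertos ++ [numeros.foldl
        (fun acertou numero =>
          if numero ∈ (PySem.Dict.mk participantes).getD participante [] then acertou + 1
          else acertou) 0]) []

-- ===== PORT B =====
-- B: build freq = {n: multiplicity} over numeros once, then for each participant sum freq over the set of their values.
def calcular_resultado_alt (participantes : List (String × List Int)) (numeros : List Int) : List Int :=
  let freq := numeros.foldl (fun d n => d.insert n (d.getD n 0 + 1)) PySem.Dict.empty
  (PySem.Dict.mk participantes).values.map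
    (fun vals => ((PySem.Set.ofList vals).map (fun v => freq.getD v 0)).sum)

-- ===== PRECONDITION & SPEC =====
-- Pre_ only demands that the association list represents a Python dict (distinct keys), which every
-- actual input of A satisfies — participantes IS a dict in Python, so nothing A accepts is excluded.
def Pre_calcular_resultado (participantes : List (String × List Int)) (numeros : List Int) : Prop :=
  (participantes.map Prod.fst).Nodup
instance (participantes : List (String × List Int)) (numeros : List Int) : Decidable (Pre_calcular_resultado participantes numeros) := by unfold Pre_calcular_resultado; infer_instance
def pvWitness_calcular_resultado : (List (String × List Int)) × List Int :=
  ([("ana", [1, 2]), ("bob", [2, 3])], [2, 2, 5])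
def Spec_calcular_resultado (participantes : List (String × List Int)) (numeros : List Int) (out : List Int) : Prop := out = calcular_resultado_alt participantes numeros
instance (participantes : List (String × List Int)) (numeros : List Int) (out : List Int) : Decidable (Spec_calcular_resultado participantes numeros out) := by unfold Spec_calcular_resultado; infer_instance

-- ===== CLAIM (what is proved, stated in full; the proofs are below) =====
def Claim_equal_calcular_resultado : Prop := ∀ (participantes : List (String × List Int)) (numeros : List Int), Dom_calcular_resultado participantes numeros → Pre_calcular_resultado participantes numeros → Spec_calcular_resultado participantes numeros (calcular_resultado participantes numeros)

-- ===== LEMMAS AND PROOFS =====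

-- summing the multiplicities of the distinct elements of `vals` inside `ns` counts the members of `ns` that lie in `vals`
lemma sum_counts_eq_countP (vals : List Int) (ns : List Int) :
    ((PySem.Set.ofList vals).map (fun v => (ns.count v : Int))).sum
      = (ns.countP (fun n => decide (n ∈ vals)) : Int) := by
  induction ns with
  | nil => simp
  | cons n ns ih =>
    have hsplit :
        ((PySem.Set.ofList vals).map (fun v => ((n :: ns).count v : Int))).sum
          = ((PySem.Set.ofList vals).map (fun v => (ns.count v : Int))).sum
            + ((PySem.Set.ofList vals).map (fun v => if decide (v = n) = true then (1 : Int) else 0)).sum := by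
      rw [← PySem.List.sum_map_add_int]
      congr 1
      apply List.map_congr_left
      intro v _
      by_cases h : v = n
      · simp [h]
      · simp [h, Ne.symm h]
    rw [hsplit, ih, PySem.List.sum_map_ite_one_zero]
    have hcnt : (PySem.Set.ofList vals).countP (fun v => decide (v = n))
        = if n ∈ vals then 1 else 0 := by
      have hbe : (fun v : Int => decide (v = n)) = (fun v => v == n) := by
        funext v; rfl
      rw [hbe, ← List.count_eq_countP]
      by_cases h : n ∈ vals
      · rw [List.count_eq_one_of_mem (PySem.Set.nodup_ofList vals)
          ((PySem.Set.mem_ofList vals n).mpr h)]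
        simp [h]
      · rw [List.count_eq_zero.mpr (fun hm => h ((PySem.Set.mem_ofList vals n).mp hm))]
        simp [h]
    rw [hcnt]
    by_cases h : n ∈ vals <;> simp [h]

-- A's inner loop over `numeros` equals B's per-participant sum over the frequency dict
lemma inner_eq (vals : List Int) (ns : List Int) :
    ns.foldl (fun acertou numero => if numero ∈ vals then acertou + 1 else acertou) (0 : Int)
      = ((PySem.Set.ofList vals).map
          (fun v => (ns.foldl (fun d n => d.insert n (d.getD n 0 + 1)) PySem.Dict.empty).getD v 0)).sum := by
  have hc := PySem.Dict.foldl_insert_getD_add_one_eq_counter (κ := Int) ns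
  rw [hc]
  have h1 := PySem.List.foldl_count_if (fun n => decide (n ∈ vals)) ns 0
  simp only [decide_eq_true_eq] at h1
  rw [h1]
  simp only [PySem.Dict.getD_counter]
  rw [sum_counts_eq_countP]
  simp

-- ===== VERDICT (by name: the statement is the Claim_ definition above) =====
theorem calcular_resultado_spec : Claim_equal_calcular_resultado := by
  intro ps ns _hdom hpre
  unfold Spec_calcular_resultado calcular_resultado calcular_resultado_alt
  rw [PySem.List.foldl_append_singleton_eq_map]
  simp only [List.nil_append]
  have hkeys : (PySem.Dict.mk ps).keys = ps.map Prod.fst := rfl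
  have hvals : (PySem.Dict.mk ps).values = ps.map Prod.snd := rfl
  rw [hkeys, hvals, List.map_map, List.map_map]
  apply List.map_congr_left
  intro p hp
  simp only [Function.comp]
  have hitems : (p.1, p.2) ∈ (PySem.Dict.mk ps).items := by
    show (p.1, p.2) ∈ ps
    simpa using hp
  have hget : (PySem.Dict.mk ps).getD p.1 [] = p.2 :=
    PySem.Dict.getD_of_mem_items _ hitems (by rw [show (PySem.Dict.mk ps).keys = ps.map Prod.fst from rfl]; exact hpre) []
  rw [hget]
  exact inner_eq p.2 ns
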